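-- pv_equiv track=rewrite | github.com/faizypoo210/Main-Jarvis | services/control-plane/app/services/github_pr_merge_workflow.py | _checks_summary_from_runs
-- ===== SOURCE A (Python) =====
-- from typing import Any
--
-- _BAD_CHECK_CONCLUSIONS = frozenset({"failure", "cancelled", "timed_out", "action_required", "stale"})
--
-- def _checks_summary_from_runs(data: dict[str, Any]) -> str:
--     runs = data.get("check_runs") or []
--     if not isinstance(runs, list):
--         return "check_runs unavailable"
--     n = len(runs)
--     if n == 0:
--         return "no check runs"
--     ok = sum(
--         1
--         for x in runs
--         if isinstance(x, dict) and str(x.get("conclusion") or "") == "success"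
--     )
--     fail = sum(
--         1
--         for x in runs
--         if isinstance(x, dict) and str(x.get("conclusion") or "") in _BAD_CHECK_CONCLUSIONS
--     )
--     pend = sum(
--         1
--         for x in runs
--         if isinstance(x, dict) and str(x.get("status") or "") in ("queued", "in_progress")
--     )
--     return f"{n} runs: {ok} ok, {fail} failed/problem, {pend} pending"
-- ===== SOURCE B (Python) =====
-- from typing import Any
--
-- _BAD_CHECK_CONCLUSIONS = frozenset({"failure", "cancelled", "timed_out", "action_required", "stale"})
--
--
-- def _run_tags(x: Any) -> list[str]:
--     if not isinstance(x, dict):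
--         return []
--     tags = []
--     c = str(x.get("conclusion") or "")
--     if c == "success":
--         tags.append("ok")
--     elif c in _BAD_CHECK_CONCLUSIONS:
--         tags.append("fail")
--     if str(x.get("status") or "") in ("queued", "in_progress"):
--         tags.append("pend")
--     return tags
--
--
-- def _checks_summary_from_runs(data: dict[str, Any]) -> str:
--     runs = data.get("check_runs") or []
--     if not isinstance(runs, list):
--         return "check_runs unavailable"
--     if not runs:
--         return "no check runs"
--     # classify each run into tags, then tally the flat tag stream in a dict
--     tally: dict[str, int] = {}
--     for t in (t for x in runs for t in _run_tags(x)):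
--         tally[t] = tally.get(t, 0) + 1
--     return (
--         f"{len(runs)} runs: {tally.get('ok', 0)} ok, "
--         f"{tally.get('fail', 0)} failed/problem, {tally.get('pend', 0)} pending"
--     )
-- ===== Notes on version B (the rewrite author's own statement) =====
-- stated objective: alternative
-- what changed: Replaces A's three predicate-sum comprehensions with a classify-then-tally scheme: each run is mapped to a list of tag strings ('ok'/'fail'/'pend') by a helper, the flattened tag stream is counted once into a dict, and the summary reads the three tag counts from the dict.
import Mathlib
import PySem

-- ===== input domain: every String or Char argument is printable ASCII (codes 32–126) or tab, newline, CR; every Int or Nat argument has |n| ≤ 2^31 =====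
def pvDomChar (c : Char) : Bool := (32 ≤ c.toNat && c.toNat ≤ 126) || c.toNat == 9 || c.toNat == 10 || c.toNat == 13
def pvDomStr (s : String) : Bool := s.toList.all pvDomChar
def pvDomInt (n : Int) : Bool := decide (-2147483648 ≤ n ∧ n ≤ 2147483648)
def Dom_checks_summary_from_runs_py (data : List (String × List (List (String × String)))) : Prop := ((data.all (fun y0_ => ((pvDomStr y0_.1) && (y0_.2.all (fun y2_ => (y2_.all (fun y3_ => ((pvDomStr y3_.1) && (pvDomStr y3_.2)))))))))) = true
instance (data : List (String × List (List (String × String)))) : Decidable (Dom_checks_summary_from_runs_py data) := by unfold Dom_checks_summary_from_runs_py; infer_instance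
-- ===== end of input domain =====

-- B classifies each run into tag strings and tallies the flat tag stream in one dict counter, instead of A's three predicate-sum passes (alternative decomposition, same cost class).

-- ===== PORT A =====
-- frozenset of bad conclusions; membership test only, so a plain list of the distinct elements
def pvBad : List String := ["failure", "cancelled", "timed_out", "action_required", "stale"]

-- Under the type convention runs is always a list and its elements are always dicts,
-- so the 'not isinstance' branches can never fire; 'or []' is the identity on lists ([] is falsy).
def checks_summary_from_runs_py (data : List (String × List (List (String × String)))) : String :=
  let runs := ((data.lookup "check_runs").getD [])
  let n := runs.length
  if n = 0 then "no check runs"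
  else
    let ok : Int := runs.countP (fun x => ((x.lookup "conclusion").getD "") == "success")
    let fail : Int := runs.countP (fun x => pvBad.contains ((x.lookup "conclusion").getD ""))
    let pend : Int := runs.countP (fun x => ["queued", "in_progress"].contains ((x.lookup "status").getD ""))
    PySem.Int.toStr n ++ " runs: " ++ PySem.Int.toStr ok ++ " ok, " ++
      PySem.Int.toStr fail ++ " failed/problem, " ++ PySem.Int.toStr pend ++ " pending"

-- ===== PORT B =====
-- _run_tags: the tags one run contributes ('isinstance' is always true under the type convention)
def pvRunTags (x : List (String × String)) : List String :=
  let tags : List String := []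
  let c := ((x.lookup "conclusion").getD "")
  let tags :=
    if c == "success" then tags ++ ["ok"]
    else if pvBad.contains c then tags ++ ["fail"]
    else tags
  if ["queued", "in_progress"].contains ((x.lookup "status").getD "") then tags ++ ["pend"] else tags

def checks_summary_from_runs_py_alt (data : List (String × List (List (String × String)))) : String :=
  let runs := ((data.lookup "check_runs").getD [])
  if runs.length = 0 then "no check runs"
  else
    -- tally[t] = tally.get(t, 0) + 1 over the flattened tag stream
    let tally := (runs.flatMap pvRunTags).foldl
      (fun d t => d.modify t (0 : Int) (· + 1)) (PySem.Dict.empty)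
    PySem.Int.toStr runs.length ++ " runs: " ++ PySem.Int.toStr (tally.getD "ok" 0) ++ " ok, " ++
      PySem.Int.toStr (tally.getD "fail" 0) ++ " failed/problem, " ++
      PySem.Int.toStr (tally.getD "pend" 0) ++ " pending"

-- ===== PRECONDITION & SPEC =====
def Spec_checks_summary_from_runs_py (data : List (String × List (List (String × String)))) (out : String) : Prop := out = checks_summary_from_runs_py_alt data
instance (data : List (String × List (List (String × String)))) (out : String) : Decidable (Spec_checks_summary_from_runs_py data out) := by unfold Spec_checks_summary_from_runs_py; infer_instance

-- ===== CLAIM =====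
def Claim_equal_checks_summary_from_runs_py : Prop := ∀ (data : List (String × List (List (String × String)))), Dom_checks_summary_from_runs_py data → Spec_checks_summary_from_runs_py data (checks_summary_from_runs_py data)

-- ===== LEMMAS AND PROOFS =====
theorem runTags_ok (x : List (String × String)) :
    (pvRunTags x).count "ok" = (if ((x.lookup "conclusion").getD "") == "success" then 1 else 0) := by
  unfold pvRunTags
  by_cases hc : ((x.lookup "conclusion").getD "") = "success" <;>
    by_cases hb : ((x.lookup "conclusion").getD "") ∈ pvBad <;>
    by_cases hs : ((x.lookup "status").getD "" = "queued" ∨ (x.lookup "status").getD "" = "in_progress") <;>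
    simp_all [pvBad]

theorem runTags_fail (x : List (String × String)) :
    (pvRunTags x).count "fail" = (if pvBad.contains ((x.lookup "conclusion").getD "") then 1 else 0) := by
  unfold pvRunTags
  by_cases hc : ((x.lookup "conclusion").getD "") = "success" <;>
    by_cases hb : ((x.lookup "conclusion").getD "") ∈ pvBad <;>
    by_cases hs : ((x.lookup "status").getD "" = "queued" ∨ (x.lookup "status").getD "" = "in_progress") <;>
    simp_all [pvBad]

theorem runTags_pend (x : List (String × String)) :
    (pvRunTags x).count "pend" = (if ["queued", "in_progress"].contains ((x.lookup "status").getD "") then 1 else 0) := by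
  unfold pvRunTags
  by_cases hc : ((x.lookup "conclusion").getD "") = "success" <;>
    by_cases hb : ((x.lookup "conclusion").getD "") ∈ pvBad <;>
    by_cases hs : ((x.lookup "status").getD "" = "queued" ∨ (x.lookup "status").getD "" = "in_progress") <;>
    simp_all [pvBad]

theorem count_tags_ok (runs : List (List (String × String))) :
    (runs.flatMap pvRunTags).count "ok" =
      runs.countP (fun x => ((x.lookup "conclusion").getD "") == "success") := by
  induction runs with
  | nil => rfl
  | cons x xs ih =>
    rw [List.flatMap_cons, List.count_append, runTags_ok, List.countP_cons, ih]
    cases (((x.lookup "conclusion").getD "") == "success") <;> simp [Nat.add_comm]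

theorem count_tags_fail (runs : List (List (String × String))) :
    (runs.flatMap pvRunTags).count "fail" =
      runs.countP (fun x => pvBad.contains ((x.lookup "conclusion").getD "")) := by
  induction runs with
  | nil => rfl
  | cons x xs ih =>
    rw [List.flatMap_cons, List.count_append, runTags_fail, List.countP_cons, ih]
    cases (pvBad.contains ((x.lookup "conclusion").getD "")) <;> simp [Nat.add_comm]

theorem count_tags_pend (runs : List (List (String × String))) :
    (runs.flatMap pvRunTags).count "pend" =
      runs.countP (fun x => ["queued", "in_progress"].contains ((x.lookup "status").getD "")) := by
  induction runs with
  | nil => rfl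
  | cons x xs ih =>
    rw [List.flatMap_cons, List.count_append, runTags_pend, List.countP_cons, ih]
    cases (["queued", "in_progress"].contains ((x.lookup "status").getD "")) <;> simp [Nat.add_comm]

-- ===== VERDICT =====
theorem checks_summary_from_runs_py_spec : Claim_equal_checks_summary_from_runs_py := by
  intro data _
  unfold Spec_checks_summary_from_runs_py checks_summary_from_runs_py checks_summary_from_runs_py_alt
  simp only []
  split
  · rfl
  · rw [PySem.Dict.getD_foldl_modify_add_one, PySem.Dict.getD_foldl_modify_add_one,
        PySem.Dict.getD_foldl_modify_add_one,
        count_tags_ok, count_tags_fail, count_tags_pend]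
    simp [PySem.Dict.getD_empty]
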